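-- pv_equiv track=rewrite | github.com/kh277/BOJ | 백준/Bronze/10798. 세로읽기/세로읽기.py | solve
-- ===== SOURCE A (Python) =====
-- def solve(string: str) -> str:
--     result = ""
--
--     max_len = 0
--     for i in range(5):
--         max_len = max(max_len, len(string[i]))
--
--     for i in range(max_len):
--         for j in range(5):
--             try:
--                 result += string[j][i]
--             except:
--                 continue
--
--     return result
-- ===== SOURCE B (Python) =====
-- def solve(string):
--     # Row-major single pass: scatter each row's characters into per-column
--     # buckets, then concatenate the buckets; no try/except, no column-major
--     # indexing.
--     rows = [string[i] for i in range(5)]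
--     cols = [[] for _ in range(max(map(len, rows)))]
--     for r in rows:
--         for i, ch in enumerate(r):
--             cols[i].append(ch)
--     return ''.join(''.join(c) for c in cols)
-- ===== Notes on version B (the rewrite author's own statement) =====
-- stated objective: alternative
-- what changed: A walks column-major, probing string[j][i] for every (column, row) pair and swallowing IndexError for short rows; B walks the data row-major in one pass, scattering each row's characters into per-column buckets and concatenating the buckets, with no exception handling and no repeated out-of-range probes.
import Mathlib
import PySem

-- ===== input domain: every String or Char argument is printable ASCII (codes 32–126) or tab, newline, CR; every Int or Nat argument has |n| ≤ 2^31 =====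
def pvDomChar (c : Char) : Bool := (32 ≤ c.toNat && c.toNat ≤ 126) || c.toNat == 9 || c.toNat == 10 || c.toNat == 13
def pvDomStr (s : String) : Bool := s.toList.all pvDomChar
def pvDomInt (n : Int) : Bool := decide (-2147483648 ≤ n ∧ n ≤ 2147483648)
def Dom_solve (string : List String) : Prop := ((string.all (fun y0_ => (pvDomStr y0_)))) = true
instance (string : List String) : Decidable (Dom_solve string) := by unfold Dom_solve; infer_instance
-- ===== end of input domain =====

-- B reads the five rows once, row by row, scattering each character into a per-column
-- bucket and concatenating the buckets — no try/except and no column-major indexing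
-- (objective: alternative algorithm; same asymptotic cost).

-- ===== PORT A =====
-- In A, the bare 'except: continue' only ever catches the IndexError of string[j][i]
-- (j < 5 is always in range under Pre_); the port makes that the 'none' branch of
-- PySem.Str.pyGet?. The first loop's string[i] raises IndexError when len < 5 —
-- excluded by Pre_solve, so pyGetD's "" default is never used there.
def solve (string : List String) : String :=
  let max_len : Int := (PySem.List.pyRange 0 5 1).foldl
    (fun m j => max m (PySem.Str.len (PySem.List.pyGetD string j ""))) 0
  let result : List Char := (PySem.List.pyRange 0 max_len 1).foldl
    (fun res i => (PySem.List.pyRange 0 5 1).foldl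
      (fun res j =>
        match PySem.Str.pyGet? (PySem.List.pyGetD string j "") i with
        | some c => res ++ [c]
        | none => res) res) []
  String.ofList result


-- ===== PORT B =====
def solve_alt (string : List String) : String :=
  let rows : List String := (PySem.List.pyRange 0 5 1).map (fun i => PySem.List.pyGetD string i "")
  let m : Int := (PySem.List.max? (rows.map PySem.Str.len) (fun x => x)).getD 0
  let cols0 : List (List Char) := List.replicate m.toNat []
  let cols := rows.foldl (fun cols r =>
      (PySem.List.enumerate r.toList 0).foldl
        (fun cols p => PySem.List.pySetD cols p.1 (PySem.List.pyGetD cols p.1 [] ++ [p.2])) cols) cols0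
  String.ofList cols.flatten


-- ===== PRECONDITION & SPEC =====
-- Pre_solve: both A and B index string[0]..string[4] unguarded, so Python raises
-- IndexError when fewer than 5 strings are given; exactly those inputs are excluded.
def Pre_solve (string : List String) : Prop := 5 ≤ string.length
instance (string : List String) : Decidable (Pre_solve string) := by unfold Pre_solve; infer_instance
def pvWitness_solve : List String := ["abc", "d", "", "ef", "ghij"]
def Spec_solve (string : List String) (out : String) : Prop := out = solve_alt string
instance (string : List String) (out : String) : Decidable (Spec_solve string out) := by unfold Spec_solve; infer_instance

-- ===== CLAIM (what is proved, stated in full; the proofs are below) =====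
def Claim_equal_solve : Prop := ∀ (string : List String), Dom_solve string → Pre_solve string → Spec_solve string (solve string)

-- ===== LEMMAS AND PROOFS =====
-- match elimination
theorem opt_step (res : List Char) (o : Option Char) :
    (match o with | some c => res ++ [c] | none => res) = res ++ o.toList := by
  cases o <;> simp

-- bucket lemma
theorem bucket (cs : List Char) : ∀ (k : Nat) (cols : List (List Char)),
    k + cs.length ≤ cols.length →
    (PySem.List.enumerate cs (k:Int)).foldl
      (fun cols p => PySem.List.pySetD cols p.1 (PySem.List.pyGetD cols p.1 [] ++ [p.2])) cols
    = cols.mapIdx (fun i l => l ++ (if k ≤ i then (cs[i-k]?).toList else [])) := by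
  induction cs with
  | nil =>
    intro k cols h
    rw [PySem.List.enumerate_nil, List.foldl_nil]
    apply List.ext_getElem?
    intro i
    by_cases hi : i < cols.length
    · simp [List.getElem?_mapIdx, hi]
    · simp [List.getElem?_mapIdx, List.getElem?_eq_none_iff.mpr (by omega : cols.length ≤ i)]
  | cons c cs ih =>
    intro k cols h
    rw [PySem.List.enumerate_cons]
    simp only [List.foldl_cons]
    have hk : k < cols.length := by simp [List.length_cons] at h; omega
    have hcast : ((k:Int) + 1) = (((k+1 : Nat)):Int) := by push_cast; ring
    rw [PySem.List.pySetD_natCast, PySem.List.pyGetD_natCast, hcast, ih (k+1)]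
    · apply List.ext_getElem?
      intro i
      by_cases hi : i < cols.length
      · rcases lt_trichotomy i k with h1 | h1 | h1
        · simp only [List.getElem?_mapIdx, List.getElem?_set, List.getElem_set, List.getElem_mapIdx,
            List.length_set, List.length_mapIdx, hi, if_true]
          simp only [eq_false (by omega : ¬ (k + 1 ≤ i)), eq_false (by omega : ¬ (k ≤ i)),
            if_false, List.append_nil]
          rw [if_neg (by omega : ¬ (k = i))]
        · subst h1
          simp [List.getElem?_mapIdx, List.getElem?_set, List.getElem_set, List.getElem_mapIdx, hi, List.getD_eq_getElem?_getD]
        · obtain ⟨j, hj⟩ : ∃ j, i - k = j + 1 := ⟨i - k - 1, by omega⟩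
          have hj2 : i - (k + 1) = j := by omega
          simp only [List.getElem?_mapIdx, List.getElem?_set, List.getElem_set, List.getElem_mapIdx,
            List.length_set, List.length_mapIdx, hi, if_true]
          simp only [eq_true (by omega : k + 1 ≤ i), eq_true (by omega : k ≤ i), if_true,
            hj, hj2, List.getElem?_cons_succ]
          rw [if_neg (by omega : ¬ (k = i))]
      · rw [List.getElem?_eq_none_iff.mpr (by simp; omega),
            List.getElem?_eq_none_iff.mpr (by simp; omega)]
    · simp [List.length_cons] at h ⊢
      omega

theorem row (r : List Char) (n : Nat) (L : Nat → List Char) (h : r.length ≤ n) :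
    (PySem.List.enumerate r 0).foldl
      (fun cols p => PySem.List.pySetD cols p.1 (PySem.List.pyGetD cols p.1 [] ++ [p.2]))
      ((List.range n).map L)
    = (List.range n).map (fun i => L i ++ (r[i]?).toList) := by
  have h0 : (0:Int) = ((0:Nat):Int) := by norm_num
  rw [h0, bucket r 0 _ (by simpa using h)]
  apply List.ext_getElem?
  intro i
  by_cases hi : i < n
  · simp [List.getElem?_mapIdx, hi]
  · rw [List.getElem?_eq_none_iff.mpr (by simp; omega),
        List.getElem?_eq_none_iff.mpr (by simp; omega)]

theorem sideB (a b c d e : String) (rest : List String) :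
    solve_alt (a::b::c::d::e::rest)
    = String.ofList ((List.range
        (max (max (max (max (PySem.Str.len a) (PySem.Str.len b)) (PySem.Str.len c))
          (PySem.Str.len d)) (PySem.Str.len e)).toNat).flatMap
        (fun k => (a.toList[k]?).toList ++ (b.toList[k]?).toList ++ (c.toList[k]?).toList
          ++ (d.toList[k]?).toList ++ (e.toList[k]?).toList)) := by
  have h5 : PySem.List.pyRange 0 5 1 = [0,1,2,3,4] := by decide
  simp only [solve_alt, h5, List.map_cons, List.map_nil]
  simp only [PySem.List.pyGetD_ofNat', PySem.List.pyGetD_zero_cons]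
  have g0 : (a::b::c::d::e::rest).getD 0 "" = a := rfl
  have g1 : (a::b::c::d::e::rest).getD 1 "" = b := rfl
  have g2 : (a::b::c::d::e::rest).getD 2 "" = c := rfl
  have g3 : (a::b::c::d::e::rest).getD 3 "" = d := rfl
  have g4 : (a::b::c::d::e::rest).getD 4 "" = e := rfl
  simp only [g0, g1, g2, g3, g4, PySem.List.max?_id_cons, Option.getD_some,
    List.foldl_cons, List.foldl_nil]
  have hlen : ∀ s : String, PySem.Str.len s = (s.toList.length : Int) := by
    intro s; simp [PySem.Str.len_eq]
  generalize hM : (max (max (max (max (PySem.Str.len a) (PySem.Str.len b)) (PySem.Str.len c))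
      (PySem.Str.len d)) (PySem.Str.len e)).toNat = N
  have ha : a.toList.length ≤ N := by rw [← hM]; simp only [hlen]; omega
  have hb : b.toList.length ≤ N := by rw [← hM]; simp only [hlen]; omega
  have hc : c.toList.length ≤ N := by rw [← hM]; simp only [hlen]; omega
  have hd : d.toList.length ≤ N := by rw [← hM]; simp only [hlen]; omega
  have he : e.toList.length ≤ N := by rw [← hM]; simp only [hlen]; omega
  rw [show List.replicate N ([]:List Char) = (List.range N).map (fun _ => []) by
    simp [List.map_const']]
  rw [row a.toList N _ ha, row b.toList N _ hb, row c.toList N _ hc,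
    row d.toList N _ hd, row e.toList N _ he]
  rw [← List.flatMap_def]
  simp

theorem sideA (a b c d e : String) (rest : List String) :
    solve (a::b::c::d::e::rest)
    = String.ofList ((List.range
        (max (max (max (max (PySem.Str.len a) (PySem.Str.len b)) (PySem.Str.len c))
          (PySem.Str.len d)) (PySem.Str.len e)).toNat).flatMap
        (fun k => (a.toList[k]?).toList ++ (b.toList[k]?).toList ++ (c.toList[k]?).toList
          ++ (d.toList[k]?).toList ++ (e.toList[k]?).toList)) := by
  have h5 : PySem.List.pyRange 0 5 1 = [0,1,2,3,4] := by decide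
  simp only [solve, h5, List.foldl_cons, List.foldl_nil]
  simp only [PySem.List.pyGetD_ofNat', PySem.List.pyGetD_zero_cons]
  have g0 : (a::b::c::d::e::rest).getD 0 "" = a := rfl
  have g1 : (a::b::c::d::e::rest).getD 1 "" = b := rfl
  have g2 : (a::b::c::d::e::rest).getD 2 "" = c := rfl
  have g3 : (a::b::c::d::e::rest).getD 3 "" = d := rfl
  have g4 : (a::b::c::d::e::rest).getD 4 "" = e := rfl
  have hlen : ∀ s : String, PySem.Str.len s = (s.toList.length : Int) := by
    intro s; simp [PySem.Str.len_eq]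
  simp only [g0, g1, g2, g3, g4, List.foldl_cons, List.foldl_nil, opt_step]
  rw [show max 0 (PySem.Str.len a) = PySem.Str.len a from max_eq_right (by rw [hlen]; omega)]
  simp only [List.append_assoc]
  rw [PySem.List.foldl_append_eq_flatMap]
  simp [PySem.List.pyRange_one, List.flatMap_map, Function.comp, List.append_assoc]

theorem key (a b c d e : String) (rest : List String) :
    solve (a::b::c::d::e::rest) = solve_alt (a::b::c::d::e::rest) := by
  rw [sideA, sideB]

-- ===== VERDICT (by name: the statement is the Claim_ definition above) =====
theorem solve_spec : Claim_equal_solve := by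
  intro string _ hpre
  unfold Spec_solve
  match string, hpre with
  | a::b::c::d::e::rest, _ => exact key a b c d e rest
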